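-- pv_equiv track=rewrite | github.com/SenatorDingo/CourseCalcerV2 | PrereqParser.py | analyseExpression
-- ===== SOURCE A (Python) =====
-- done = ["NUL0000", "SEG2900", "ENG1112", "ITI1120", "PHY1321", "MAT1320", "MAT1348", "ITI1121", "ITI1100", "MAT1322", "PHY1322",
--         "MAT1341", "CHM1311", "CSI2110", "SEG2105", "GNG1105", "GNG2101", "MAT2377", "SEG3102", "CEG2136", "SEG2901"]
--
-- def analyseExpression(expression):
--     if 'or' in expression:
--         options = expression.split('or')
--         for option in options:
--             if option in done:
--                 return True
--         return False
--     elif '|' in expression: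
--         expression = expression.replace('$', '')
--         command = expression.split('|')
--         numCourse = int(int(command[0])/3)
--         allowedMajors = [command[1][i:i + 3] for i in range(0, len(command[1]), 3)]
--         allowedYears = command[2].split(':')
--         qualifying = 0
--         for finished in done:
--             if finished[0] + finished[1] + finished[2] in allowedMajors and finished[3] in allowedYears:
--                 qualifying += 1
--         if qualifying >= numCourse:
--             return True
--         return False
-- ===== SOURCE B (Python) =====
-- done = ["NUL0000", "SEG2900", "ENG1112", "ITI1120", "PHY1321", "MAT1320", "MAT1348", "ITI1121", "ITI1100", "MAT1322", "PHY1322",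
--         "MAT1341", "CHM1311", "CSI2110", "SEG2105", "GNG1105", "GNG2101", "MAT2377", "SEG3102", "CEG2136", "SEG2901"]
--
-- def _chunks3(s):
--     out = []
--     while s:
--         out.append(s[:3])
--         s = s[3:]
--     return out
--
-- def analyseExpression(expression):
--     if 'or' in expression:
--         options = expression.split('or')
--         return any(c in options for c in done)
--     if '|' in expression:
--         head, majors_s, years_s = expression.replace('$', '').split('|')[:3]
--         need = int(int(head) / 3)
--         majors = set(_chunks3(majors_s))
--         years = set(years_s.split(':'))
--         qualifying = sum(sum(sum(1 for f in done if f[:3] == m and f[3] == y)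
--                              for y in years)
--                          for m in majors)
--         return qualifying >= need
-- ===== Notes on version B (the rewrite author's own statement) =====
-- stated objective: alternative
-- what changed: B reverses both traversals: the or-branch scans done and tests membership in the option list, and the pipe branch unpacks the first three fields, chunks the majors with a while loop, and counts done matches per deduplicated (major, year) combination instead of one scan of done with membership tests; Pre_ additionally excludes pipe-expressions whose first three fields are missing or whose leading field does not parse as an int of magnitude <= 2^52, where A raises (IndexError/ValueError) or goes through inexact float division the ports cannot model.
-- outside the precondition, e.g. on analyseExpression('9007199254740993|CSI|1'): A returns False, B returns False
import Mathlib
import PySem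

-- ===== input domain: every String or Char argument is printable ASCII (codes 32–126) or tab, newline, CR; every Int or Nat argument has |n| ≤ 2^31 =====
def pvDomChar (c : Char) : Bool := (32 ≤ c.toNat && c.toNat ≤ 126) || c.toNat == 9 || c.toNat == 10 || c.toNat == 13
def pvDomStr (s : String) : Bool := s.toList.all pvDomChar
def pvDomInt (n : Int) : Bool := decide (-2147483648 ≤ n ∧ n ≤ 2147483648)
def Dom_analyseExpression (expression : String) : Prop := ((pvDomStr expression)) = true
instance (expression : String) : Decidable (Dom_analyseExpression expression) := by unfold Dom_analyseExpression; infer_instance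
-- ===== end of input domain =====

-- B reverses both traversals of A: the or-branch scans `done` testing membership in the
-- option list, and the pipe branch unpacks three fields, chunks the majors with a while loop,
-- and counts matches of `done` per deduplicated (major, year) combination; alternative
-- decomposition, no speed claim.

-- the module-level constant `done`
def pvDone : List (List Char) :=
  ["NUL0000".toList, "SEG2900".toList, "ENG1112".toList, "ITI1120".toList, "PHY1321".toList,
   "MAT1320".toList, "MAT1348".toList, "ITI1121".toList, "ITI1100".toList, "MAT1322".toList,
   "PHY1322".toList, "MAT1341".toList, "CHM1311".toList, "CSI2110".toList, "SEG2105".toList,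
   "GNG1105".toList, "GNG2101".toList, "MAT2377".toList, "SEG3102".toList, "CEG2136".toList,
   "SEG2901".toList]

-- ===== PORT A =====
def analyseExpression (expression : String) : Option Bool :=
  let e := expression.toList
  if PySem.Chars.isIn ['o', 'r'] e then
    let options := PySem.Chars.splitOn e ['o', 'r']
    some (options.any (fun o => pvDone.contains o))
  else if PySem.Chars.isIn ['|'] e then
    let e2 := PySem.Chars.replace e ['$'] []
    let command := PySem.Chars.splitOn e2 ['|']
    match PySem.Int.ofChars? (command.getD 0 []) with
    | none => none       -- int(command[0]) raises ValueError: excluded by Pre_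
    | some n =>
      -- int(int(command[0])/3): truncating division; exact under Pre_'s |n| ≤ 2^52 bound
      let numCourse := Int.tdiv n 3
      let c1 := command.getD 1 []          -- command[1]/command[2]: IndexError excluded by Pre_
      let allowedMajors := (PySem.List.pyRange 0 (c1.length : Int) 3).map
        (fun i => PySem.List.slice c1 (some i) (some (i + 3)))
      let allowedYears := PySem.Chars.splitOn (command.getD 2 []) [':']
      let qualifying := pvDone.foldl (fun acc f =>
        if allowedMajors.contains
             [PySem.List.pyGetD f 0 ' ', PySem.List.pyGetD f 1 ' ', PySem.List.pyGetD f 2 ' ']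
           && allowedYears.contains [PySem.List.pyGetD f 3 ' '] then acc + 1 else acc) (0 : Int)
      some (decide (numCourse ≤ qualifying))
  else none

-- ===== PORT B =====
-- `_chunks3`: Source B's while loop, as the structural recursion on the shrinking string
def pvChunks3 (s : List Char) : List (List Char) :=
  if h : s = [] then [] else
    PySem.List.slice s none (some 3) :: pvChunks3 (PySem.List.slice s (some 3) none)
termination_by s.length
decreasing_by
  rw [PySem.List.slice_from s (by norm_num)]
  simp only [List.length_drop]
  have hs : s.length ≠ 0 := fun hz => h (List.length_eq_zero_iff.mp hz)
  omega

def analyseExpression_alt (expression : String) : Option Bool :=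
  let e := expression.toList
  if PySem.Chars.isIn ['o', 'r'] e then
    let options := PySem.Chars.splitOn e ['o', 'r']
    -- any(c in options for c in done)
    some (pvDone.any (fun c => options.contains c))
  else if PySem.Chars.isIn ['|'] e then
    -- head, majors_s, years_s = expression.replace('$','').split('|')[:3]
    match PySem.List.slice (PySem.Chars.splitOn (PySem.Chars.replace e ['$'] []) ['|'])
        none (some 3) with
    | [head, majorsS, yearsS] =>
      match PySem.Int.ofChars? head with
      | none => none     -- int(head) raises ValueError: excluded by Pre_
      | some n =>
        let need := Int.tdiv n 3   -- int(int(head)/3); exact under Pre_'s |n| ≤ 2^52 bound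
        let majors := PySem.Set.ofList (pvChunks3 majorsS)
        let years := PySem.Set.ofList (PySem.Chars.splitOn yearsS [':'])
        -- sum(sum(sum(1 for f in done if f[:3]==m and f[3]==y) for y in years) for m in majors)
        -- (the inner generator count is List.countP)
        let qualifying := (majors.map (fun m =>
          (years.map (fun y =>
            ((pvDone.countP (fun f =>
              PySem.List.slice f none (some 3) == m
                && [PySem.List.pyGetD f 3 ' '] == y)) : Int))).sum)).sum
        some (decide (need ≤ qualifying))
    | _ => none          -- the 3-tuple unpack raises ValueError: excluded by Pre_
  else none

-- ===== PRECONDITION & SPEC =====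
-- Pre_ excludes pipe-branch inputs with fewer than three pipe-separated fields (A raises
-- IndexError) or whose leading field does not parse as an int (ValueError); it also excludes,
-- although A returns there, a leading int of magnitude > 2^52, where Python's float division
-- int(n/3) is not exactly the truncating division the ports use.
def Pre_analyseExpression (expression : String) : Prop :=
  PySem.Chars.isIn "or".toList expression.toList = true ∨
  (PySem.Chars.isIn "|".toList expression.toList = true →
    (3 ≤ (PySem.Chars.splitOn (PySem.Chars.replace expression.toList "$".toList []) "|".toList).length ∧
     (PySem.Int.ofChars?
       ((PySem.Chars.splitOn (PySem.Chars.replace expression.toList "$".toList []) "|".toList).getD 0 [])).isSome = true ∧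
     ((PySem.Int.ofChars?
       ((PySem.Chars.splitOn (PySem.Chars.replace expression.toList "$".toList []) "|".toList).getD 0 [])).getD 0).natAbs ≤ 2 ^ 52))
instance (expression : String) : Decidable (Pre_analyseExpression expression) := by
  unfold Pre_analyseExpression; infer_instance

def pvWitness_analyseExpression : String := "9|CSIITIMAT|1:2"

def Spec_analyseExpression (expression : String) (out : Option Bool) : Prop :=
  out = analyseExpression_alt expression
instance (expression : String) (out : Option Bool) : Decidable (Spec_analyseExpression expression out) := by
  unfold Spec_analyseExpression; infer_instance

-- ===== CLAIM (what is proved, stated in full; the proofs are below) =====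
def Claim_equal_analyseExpression : Prop :=
  ∀ (expression : String), Dom_analyseExpression expression →
    Pre_analyseExpression expression →
    Spec_analyseExpression expression (analyseExpression expression)

-- ===== LEMMAS AND PROOFS =====

-- or-branch: scanning the options for a done course = scanning done for an option
lemma pv_or_branch (options : List (List Char)) :
    options.any (fun o => pvDone.contains o) = pvDone.any (fun c => options.contains c) := by
  rw [Bool.eq_iff_iff]
  simp only [List.any_eq_true, List.contains_iff_mem]
  exact ⟨fun ⟨o, h1, h2⟩ => ⟨o, h2, h1⟩, fun ⟨c, h1, h2⟩ => ⟨c, h2, h1⟩⟩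

-- A's range-of-slices comprehension produces exactly B's while-loop chunking
lemma pv_chunks_eq_aux (N : Nat) : ∀ (s : List Char), s.length = N →
    (PySem.List.pyRange 0 (s.length : Int) 3).map
        (fun i => PySem.List.slice s (some i) (some (i + 3))) = pvChunks3 s := by
  induction N using Nat.strong_induction_on with
  | _ N ih =>
    intro s hs
    rw [PySem.List.pyRange_of_pos 0 ((s.length : Nat) : Int) (by norm_num : (0:Int) < 3)]
    rcases Nat.eq_zero_or_pos N with h0 | hpos
    · have : s = [] := List.length_eq_zero_iff.mp (hs.trans h0)
      subst this
      rw [pvChunks3]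
      simp
    · have hne : s ≠ [] := fun he => by simp [he] at hs; omega
      have hlt : (0 : Int) < (s.length : Int) := by
        have := hs ▸ hpos; exact_mod_cast this
      rw [if_pos hlt]
      have hcnt : (((s.length : Int) - 0 + 3 - 1) / 3).toNat = (s.length + 2) / 3 := by
        omega
      rw [hcnt]
      have hge1 : 1 ≤ (s.length + 2) / 3 := by omega
      obtain ⟨m, hm⟩ : ∃ m, (s.length + 2) / 3 = m + 1 := ⟨(s.length + 2) / 3 - 1, by omega⟩
      rw [hm, List.range_succ_eq_map]
      simp only [List.map_cons, List.map_map]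
      rw [pvChunks3, dif_neg hne]
      -- the head chunk s[0:3] = s[:3] is closed by congr; the tail goal remains
      congr 1
      case e_tail =>
        -- tail chunks: slices of s at 3(k+1) are slices of s.drop 3 at 3k
        have hdrop : PySem.List.slice s (some 3) none = s.drop 3 := by
          rw [PySem.List.slice_from s (by norm_num)]; rfl
        rw [hdrop, ← ih ((s.drop 3).length) (by simp; omega) (s.drop 3) rfl,
            PySem.List.pyRange_of_pos 0 (((s.drop 3).length : Nat) : Int) (by norm_num : (0:Int) < 3)]
        by_cases h3 : (0 : Int) < ((s.drop 3).length : Int)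
        · rw [if_pos h3]
          have hm' : (((s.drop 3).length : Int) - 0 + 3 - 1) / 3 = (m : Int) := by
            have hl : (s.drop 3).length = s.length - 3 := by simp
            omega
          rw [hm', Int.toNat_natCast, List.map_map]
          apply List.map_congr_left
          intro k _
          simp only [Function.comp]
          have e1 : (3 : Int) * ((Nat.succ k : Nat) : Int) = ((3 * k + 3 : Nat) : Int) := by
            push_cast; ring
          have e2 : (0 : Int) + 3 * ((k : Nat) : Int) = ((3 * k : Nat) : Int) := by
            push_cast; ring
          rw [e1, e2]
          simp only [zero_add]
          rw [show ((3 * k + 3 : Nat) : Int) + 3 = ((3 * k + 3 : Nat) : Int) + ((3 : Nat) : Int) by norm_num,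
              show ((3 * k : Nat) : Int) + 3 = ((3 * k : Nat) : Int) + ((3 : Nat) : Int) by norm_num,
              PySem.List.slice_natCast_add, PySem.List.slice_natCast_add,
              List.drop_drop]
          congr 2
          omega
        · -- s.drop 3 is empty: no tail chunks on either side (m = 0)
          rw [if_neg h3]
          have hl : (s.drop 3).length = s.length - 3 := by simp
          have hm0 : m = 0 := by omega
          simp [hm0]

lemma pv_chunks_eq (s : List Char) :
    (PySem.List.pyRange 0 (s.length : Int) 3).map
        (fun i => PySem.List.slice s (some i) (some (i + 3))) = pvChunks3 s :=
  pv_chunks_eq_aux s.length s rfl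

-- a 0/c-indicator summed over a duplicate-free list
lemma pv_sum_ind {α : Type} [DecidableEq α] (L : List α) (hL : L.Nodup) (a : α) (c : Int) :
    (L.map (fun y => if a = y then c else 0)).sum = if a ∈ L then c else 0 := by
  induction L with
  | nil => simp
  | cons y t ih =>
    simp only [List.map_cons, List.sum_cons, List.nodup_cons] at *
    rcases hL with ⟨hyt, hnd⟩
    by_cases hay : a = y
    · subst hay; simp [ih hnd, hyt]
    · simp [hay, ih hnd]

-- counting in two ways: A's filtered count of l equals B's per-combination counts summed
-- over the deduplicated key combinations
lemma pv_count_eq (l : List (List Char)) (Ms Ys : List (List Char))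
    (k1 k2 : List Char → List Char) :
    l.foldl (fun acc f => if Ms.contains (k1 f) && Ys.contains (k2 f) then acc + 1 else acc) (0 : Int)
      = ((PySem.Set.ofList Ms).map (fun m => ((PySem.Set.ofList Ys).map (fun y =>
          ((l.countP (fun f => k1 f == m && k2 f == y)) : Int))).sum)).sum := by
  rw [PySem.List.foldl_if_add_one, zero_add]
  induction l with
  | nil => simp
  | cons f t ih =>
    simp only [List.countP_cons]
    push_cast
    simp only [PySem.List.sum_map_add_int]
    rw [← ih]
    congr 1
    have step : ∀ (m y : List Char),
        (if (k1 f == m && k2 f == y) then (1:Int) else 0)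
          = if k2 f = y then (if k1 f = m then (1:Int) else 0) else 0 := by
      intro m y
      by_cases h1 : k1 f = m <;> by_cases h2 : k2 f = y <;> simp [h1, h2]
    simp only [step]
    simp only [pv_sum_ind _ (PySem.Set.nodup_ofList Ys)]
    by_cases hy : k2 f ∈ PySem.Set.ofList Ys
    · simp only [hy, if_true]
      rw [pv_sum_ind _ (PySem.Set.nodup_ofList Ms)]
      have hy' : k2 f ∈ Ys := (PySem.Set.mem_ofList Ys (k2 f)).mp hy
      by_cases hm : k1 f ∈ Ms
      · simp [hm, hy', PySem.Set.mem_ofList]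
      · simp [hm, PySem.Set.mem_ofList]
    · simp only [hy, if_false]
      have hy' : k2 f ∉ Ys := fun h => hy ((PySem.Set.mem_ofList Ys (k2 f)).mpr h)
      simp [hy']

-- pipe branch, specialised to pvDone: A's indexing key equals the slice key on every element
lemma pv_pipe_branch (Ms Ys : List (List Char)) :
    pvDone.foldl (fun acc f =>
        if Ms.contains [PySem.List.pyGetD f 0 ' ', PySem.List.pyGetD f 1 ' ', PySem.List.pyGetD f 2 ' ']
           && Ys.contains [PySem.List.pyGetD f 3 ' '] then acc + 1 else acc) (0 : Int)
      = ((PySem.Set.ofList Ms).map (fun m => ((PySem.Set.ofList Ys).map (fun y =>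
          ((pvDone.countP (fun f =>
              PySem.List.slice f none (some 3) == m
                && [PySem.List.pyGetD f 3 ' '] == y)) : Int))).sum)).sum := by
  rw [PySem.List.foldl_congr_mem pvDone _ (fun acc f =>
        if Ms.contains (PySem.List.slice f none (some 3))
           && Ys.contains [PySem.List.pyGetD f 3 ' '] then acc + 1 else acc) 0 ?_]
  · exact pv_count_eq pvDone Ms Ys _ _
  · intro acc f hf
    have h3 : [PySem.List.pyGetD f 0 ' ', PySem.List.pyGetD f 1 ' ', PySem.List.pyGetD f 2 ' ']
        = PySem.List.slice f none (some 3) := by fin_cases hf <;> decide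
    rw [h3]

-- ===== VERDICT (by name: the statement is the Claim_ definition above) =====
theorem analyseExpression_spec : Claim_equal_analyseExpression := by
  intro e _ hpre
  unfold Spec_analyseExpression analyseExpression analyseExpression_alt
  by_cases h1 : PySem.Chars.isIn ['o', 'r'] e.toList = true
  · simp only [h1, if_true, pv_or_branch]
  · simp only [Bool.not_eq_true] at h1
    simp only [h1, Bool.false_eq_true, if_false]
    by_cases h2 : PySem.Chars.isIn ['|'] e.toList = true
    · simp only [h2, if_true]
      rcases hpre with hor | hp
      · have hor' : PySem.Chars.isIn ['o', 'r'] e.toList = true := hor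
        rw [h1] at hor'; exact absurd hor' (by simp)
      obtain ⟨hlen0, _, _⟩ := hp h2
      set command := PySem.Chars.splitOn (PySem.Chars.replace e.toList ['$'] []) ['|'] with hcmd
      have hlen : 3 ≤ command.length := hlen0
      obtain ⟨c0, c1, c2, rest, hc⟩ : ∃ c0 c1 c2 rest, command = c0 :: c1 :: c2 :: rest := by
        match command, hlen with
        | c0 :: c1 :: c2 :: rest, _ => exact ⟨c0, c1, c2, rest, rfl⟩
      rw [hc]
      have hslice : PySem.List.slice (c0 :: c1 :: c2 :: rest) none (some 3)
          = [c0, c1, c2] := by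
        rw [PySem.List.slice_to _ (by norm_num)]; rfl
      rw [hslice]
      simp only [List.getD, List.getElem?_cons_zero, List.getElem?_cons_succ, Option.getD_some]
      cases hp0 : PySem.Int.ofChars? c0 with
      | none => rfl
      | some n =>
        simp only [pv_pipe_branch, pv_chunks_eq]
    · simp only [Bool.not_eq_true] at h2
      simp only [h2, Bool.false_eq_true, if_false]
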